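-- pv_equiv track=rewrite | github.com/ag502/algorithm | Problem/BOJ_16198_에너지 모으기/main.py | get_side_weights
-- ===== SOURCE A (Python) =====
-- def get_side_weights(cur_idx, weights):
--     left_weight = right_weight = 0
--     for idx in range(cur_idx - 1, -1, -1):
--         if weights[idx] != -1:
--             left_weight = weights[idx]
--             break
--     for idx in range(cur_idx + 1, len(weights)):
--         if weights[idx] != -1:
--             right_weight = weights[idx]
--             break
--     return [left_weight, right_weight]
-- ===== SOURCE B (Python) =====
-- def get_side_weights(cur_idx, weights):
--     left_weight, right_weight, right_found = 0, 0, False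
--     for idx, w in enumerate(weights):
--         if w != -1:
--             if idx < cur_idx:
--                 left_weight = w
--             elif idx > cur_idx and not right_found:
--                 right_weight = w
--                 right_found = True
--     return [left_weight, right_weight]
-- ===== Notes on version B (the rewrite author's own statement) =====
-- stated objective: alternative
-- what changed: Replaces A's two index-range scans (backward with break, forward with break) by one forward pass over enumerate(weights) that overwrites a left accumulator and latches the first right value with a found flag.
-- outside the precondition, e.g. on get_side_weights(-3, [1, 2, 3, 4, 5]): A returns [0, 4], B returns [0, 1]; on get_side_weights(3, [1, 2]): A raises IndexError, B returns [2, 0]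
import Mathlib
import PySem

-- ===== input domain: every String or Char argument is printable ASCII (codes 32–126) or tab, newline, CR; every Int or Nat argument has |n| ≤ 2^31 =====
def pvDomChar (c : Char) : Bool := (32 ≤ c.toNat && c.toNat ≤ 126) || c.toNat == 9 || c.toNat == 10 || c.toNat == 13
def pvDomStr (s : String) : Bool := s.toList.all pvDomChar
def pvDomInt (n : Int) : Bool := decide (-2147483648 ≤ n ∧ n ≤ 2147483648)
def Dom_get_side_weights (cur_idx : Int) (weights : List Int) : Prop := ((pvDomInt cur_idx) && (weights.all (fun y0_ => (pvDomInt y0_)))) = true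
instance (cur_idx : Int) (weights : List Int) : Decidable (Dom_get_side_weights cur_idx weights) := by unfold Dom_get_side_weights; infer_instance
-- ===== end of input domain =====

-- B replaces A's two break-scans by one forward pass over enumerate with an overwrite/latch state (alternative decomposition, same cost).


-- ===== PORT A =====
-- both of A's for-loops: first weights[idx] ≠ -1 along the index list, else 0 (`none` = IndexError, outside Pre_)
def pvScanBreak (ws : List Int) : List Int → Int
  | [] => 0
  | idx :: rest =>
    match PySem.List.pyGet? ws idx with
    | none => 0
    | some w => if w ≠ -1 then w else pvScanBreak ws rest

def get_side_weights (cur_idx : Int) (weights : List Int) : List Int :=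
  let left_weight := pvScanBreak weights (PySem.List.pyRange (cur_idx - 1) (-1) (-1))
  let right_weight := pvScanBreak weights (PySem.List.pyRange (cur_idx + 1) (weights.length : Int) 1)
  [left_weight, right_weight]

-- ===== PORT B =====
def pvStep (cur_idx : Int) (st : Int × Int × Bool) (p : Int × Int) : Int × Int × Bool :=
  if p.2 ≠ -1 then
    if p.1 < cur_idx then (p.2, st.2.1, st.2.2)
    else if p.1 > cur_idx && !st.2.2 then (st.1, p.2, true)
    else st
  else st

def get_side_weights_alt (cur_idx : Int) (weights : List Int) : List Int :=
  let s := (PySem.List.enumerate weights 0).foldl (pvStep cur_idx) (0, 0, false)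
  [s.1, s.2.1]

-- ===== PRECONDITION & SPEC =====
-- Pre_ excludes cur_idx > len(weights), where A raises IndexError, and cur_idx < -1, which is
-- outside the natural index domain (A's values there are an artefact of negative-index wraparound
-- in its second loop); cur_idx = -1 is kept (A's first range is empty there and no index wraps).
def Pre_get_side_weights (cur_idx : Int) (weights : List Int) : Prop :=
  (0 ≤ cur_idx ∧ cur_idx ≤ (weights.length : Int)) ∨ cur_idx = -1
instance (cur_idx : Int) (weights : List Int) : Decidable (Pre_get_side_weights cur_idx weights) := by unfold Pre_get_side_weights; infer_instance

def pvWitness_get_side_weights : Int × List Int := (2, [3, -1, 5, -1, 7])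

def Spec_get_side_weights (cur_idx : Int) (weights : List Int) (out : List Int) : Prop := out = get_side_weights_alt cur_idx weights
instance (cur_idx : Int) (weights : List Int) (out : List Int) : Decidable (Spec_get_side_weights cur_idx weights out) := by unfold Spec_get_side_weights; infer_instance

-- ===== CLAIM (what is proved, stated in full; the proofs are below) =====
def Claim_equal_get_side_weights : Prop := ∀ (cur_idx : Int) (weights : List Int), Dom_get_side_weights cur_idx weights → Pre_get_side_weights cur_idx weights → Spec_get_side_weights cur_idx weights (get_side_weights cur_idx weights)

-- ===== LEMMAS AND PROOFS =====

-- first element ≠ -1 of l, else the default a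
def pvFirstNon : List Int → Int → Int
  | [], a => a
  | w :: t, a => if w ≠ -1 then w else pvFirstNon t a

theorem pvFirstNon_append_singleton (u : List Int) (x a : Int) :
    pvFirstNon (u ++ [x]) a = pvFirstNon u (if x ≠ -1 then x else a) := by
  induction u with
  | nil => simp [pvFirstNon]
  | cons w t ih => by_cases h : w = -1 <;> simp [pvFirstNon, h, ih]

-- A's left loop = pvFirstNon over the reversed prefix
theorem scan_left_eq (ws : List Int) (k : Nat) (hk : k ≤ ws.length) :
    pvScanBreak ws (PySem.List.pyRange ((k : Int) - 1) (-1) (-1)) =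
      pvFirstNon ((ws.take k).reverse) 0 := by
  induction k with
  | zero => simp [PySem.List.pyRange_neg_one_eq_nil, pvScanBreak, pvFirstNon]
  | succ k ih =>
    have hklt : k < ws.length := hk
    have h1 : ((k + 1 : Nat) : Int) - 1 = (k : Int) := by push_cast; ring
    rw [h1, PySem.List.pyRange_neg_one_cons (by omega : (-1 : Int) < (k : Int))]
    have hget : PySem.List.pyGet? ws (k : Int) = some ws[k] := by
      simp [PySem.List.pyGet?_natCast, List.getElem?_eq_getElem hklt]
    rw [pvScanBreak, hget]
    have htake : ws.take (k + 1) = ws.take k ++ [ws[k]] := by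
      rw [List.take_add_one]; simp [List.getElem?_eq_getElem hklt]
    rw [htake, List.reverse_append]
    simp only [List.reverse_singleton, List.singleton_append, pvFirstNon]
    rw [ih (Nat.le_of_lt hklt)]

-- A's right loop = pvFirstNon over the suffix after i
theorem scan_right_eq (ws : List Int) (i : Nat) :
    pvScanBreak ws (PySem.List.pyRange (i : Int) (ws.length : Int) 1) =
      pvFirstNon (ws.drop i) 0 := by
  generalize hd : ws.length - i = d
  induction d generalizing i with
  | zero =>
    have hle : ws.length ≤ i := by omega
    rw [PySem.List.pyRange_one_eq_nil (by exact_mod_cast hle)]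
    simp [pvScanBreak, List.drop_eq_nil_of_le hle, pvFirstNon]
  | succ d ih =>
    have hlt : i < ws.length := by omega
    rw [PySem.List.pyRange_one_cons (by exact_mod_cast hlt)]
    have hget : PySem.List.pyGet? ws (i : Int) = some ws[i] := by
      simp [PySem.List.pyGet?_natCast, List.getElem?_eq_getElem hlt]
    rw [pvScanBreak, hget]
    have hdrop : ws.drop i = ws[i] :: ws.drop (i + 1) := List.drop_eq_getElem_cons hlt
    have hcast : (i : Int) + 1 = ((i + 1 : Nat) : Int) := by push_cast; ring
    rw [hdrop]
    simp only [pvFirstNon]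
    rw [hcast, ih (i + 1) (by omega)]

-- B's fold on indices strictly below cur: overwrites the left slot, keeps the rest
theorem fold_below (cur : Int) (xs : List Int) (s l r : Int) (fd : Bool)
    (h : s + (xs.length : Int) ≤ cur) :
    (PySem.List.enumerate xs s).foldl (pvStep cur) (l, r, fd) =
      (xs.foldl (fun a w => if w ≠ -1 then w else a) l, r, fd) := by
  induction xs generalizing s l with
  | nil => simp [PySem.List.enumerate_nil]
  | cons x t ih =>
    have hs : s < cur := by simp at h; omega
    rw [PySem.List.enumerate_cons, List.foldl_cons, List.foldl_cons]
    have hstep : pvStep cur (l, r, fd) (s, x) = ((if x ≠ -1 then x else l), r, fd) := by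
      by_cases hx : x = -1 <;> simp [pvStep, hx, hs]
    rw [hstep]
    apply ih
    simp at h ⊢
    omega

-- once found, nothing changes on indices above cur
theorem fold_above_found (cur : Int) (xs : List Int) (s l r : Int)
    (h : cur < s) :
    (PySem.List.enumerate xs s).foldl (pvStep cur) (l, r, true) = (l, r, true) := by
  induction xs generalizing s with
  | nil => simp [PySem.List.enumerate_nil]
  | cons x t ih =>
    rw [PySem.List.enumerate_cons, List.foldl_cons]
    have hstep : pvStep cur (l, r, true) (s, x) = (l, r, true) := by
      by_cases hx : x = -1 <;> simp [pvStep, hx, not_lt.mpr (le_of_lt h)]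
    rw [hstep]; exact ih (s + 1) (by omega)

-- B's fold on indices strictly above cur latches the first non-(-1) value
theorem fold_above (cur : Int) (xs : List Int) (s l : Int) (h : cur < s) :
    (PySem.List.enumerate xs s).foldl (pvStep cur) (l, 0, false) =
      (l, pvFirstNon xs 0, xs.any (fun w => decide (w ≠ -1))) := by
  induction xs generalizing s with
  | nil => simp [PySem.List.enumerate_nil, pvFirstNon]
  | cons x t ih =>
    rw [PySem.List.enumerate_cons, List.foldl_cons]
    by_cases hx : x = -1
    · have hstep : pvStep cur (l, 0, false) (s, x) = (l, 0, false) := by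
        simp [pvStep, hx]
      rw [hstep, ih (s + 1) (by omega)]
      simp [pvFirstNon, hx]
    · have hstep : pvStep cur (l, 0, false) (s, x) = (l, x, true) := by
        simp [pvStep, hx, not_lt.mpr (le_of_lt h), h]
      rw [hstep, fold_above_found cur t (s + 1) l x (by omega)]
      simp [pvFirstNon, hx]

-- final-state overwrite fold = first-non over the reverse
theorem foldl_eq_firstNon_reverse (xs : List Int) (a : Int) :
    xs.foldl (fun a w => if w ≠ -1 then w else a) a = pvFirstNon xs.reverse a := by
  induction xs generalizing a with
  | nil => simp [pvFirstNon]
  | cons x t ih =>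
    rw [List.foldl_cons, ih, List.reverse_cons, pvFirstNon_append_singleton]

-- ===== VERDICT (by name: the statement is the Claim_ definition above) =====
theorem get_side_weights_spec : Claim_equal_get_side_weights := by
  intro cur ws _ hpre
  rcases hpre with ⟨h0, hle⟩ | hneg
  case inr =>
    subst hneg
    unfold Spec_get_side_weights get_side_weights get_side_weights_alt
    rw [PySem.List.pyRange_neg_one_eq_nil (by omega : (-1 : Int) - 1 ≤ -1)]
    have h0 : ((-1 : Int) + 1) = ((0 : Nat) : Int) := by norm_num
    rw [h0, scan_right_eq ws 0, List.drop_zero]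
    have hfa := fold_above (-1) ws 0 0 (by omega : (-1 : Int) < ((0 : Nat) : Int))
    simp only [hfa]
    rfl
  set k : Nat := cur.toNat with hk
  have hck : (k : Int) = cur := Int.toNat_of_nonneg h0
  have hklen : k ≤ ws.length := by omega
  unfold Spec_get_side_weights get_side_weights get_side_weights_alt
  -- decompose B's fold: ws = take k ++ drop k
  have hsplit : ws = ws.take k ++ ws.drop k := (List.take_append_drop k ws).symm
  have hlen_take : (ws.take k).length = k := List.length_take_of_le hklen
  have henum : PySem.List.enumerate ws 0 =
      PySem.List.enumerate (ws.take k) 0 ++ PySem.List.enumerate (ws.drop k) (0 + (ws.take k).length) := by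
    conv_lhs => rw [hsplit]
    exact PySem.List.enumerate_append _ _ _
  rw [henum, List.foldl_append]
  rw [fold_below cur (ws.take k) 0 0 0 false (by rw [hlen_take]; omega)]
  rw [foldl_eq_firstNon_reverse]
  rw [← scan_left_eq ws k hklen, hck]
  have hcast2 : (0 : Int) + (ws.take k).length = (k : Int) := by rw [hlen_take]; omega
  rw [hcast2]
  by_cases hkl : k < ws.length
  · have hdrop : ws.drop k = ws[k] :: ws.drop (k + 1) := List.drop_eq_getElem_cons hkl
    rw [hdrop, PySem.List.enumerate_cons, List.foldl_cons]
    have hstep : pvStep cur (pvScanBreak ws (PySem.List.pyRange (cur - 1) (-1) (-1)), 0, false)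
        ((k : Int), ws[k]) = (pvScanBreak ws (PySem.List.pyRange (cur - 1) (-1) (-1)), 0, false) := by
      by_cases hx : ws[k] = -1 <;> simp [pvStep, hx, hck]
    rw [hstep, fold_above cur (ws.drop (k + 1)) ((k : Int) + 1) _ (by omega)]
    rw [← scan_right_eq ws (k + 1)]
    have hc3 : ((k + 1 : Nat) : Int) = cur + 1 := by push_cast; omega
    rw [hc3]
  · have hkeq : k = ws.length := by omega
    have hdrop : ws.drop k = [] := List.drop_eq_nil_of_le (by omega)
    rw [hdrop]
    simp only [PySem.List.enumerate_nil, List.foldl_nil]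
    have hc3 : cur + 1 = ((k + 1 : Nat) : Int) := by push_cast; omega
    rw [hc3, scan_right_eq ws (k + 1),
      List.drop_eq_nil_of_le (by omega : ws.length ≤ k + 1)]
    rfl
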